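-- pv_equiv track=rewrite | github.com/pte6144-rit/csec472-lab4 | imagediff.py | get_ridges
-- ===== SOURCE A (Python) =====
-- def get_ridges(line):
--     first_previous = 0
--     second_previous = 0
--     third_previous = 0
--     previous = 0
--     ridges = 0
--     for value in line:
--         new = 1 if value > previous else -1
--         previous = value
--         if third_previous == -1 and second_previous == -1 and first_previous == 1 and new == 1:
--             ridges += 1
--         third_previous, second_previous, first_previous = second_previous, first_previous, new
--     return ridges
-- ===== SOURCE B (Python) =====
-- def get_ridges(line):
--     # Run-length encode the up/down sign sequence, then count boundaries where a
--     # down-run of length >= 2 is immediately followed by an up-run of length >= 2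
--     # (each such boundary is exactly one occurrence of the D,D,U,U pattern).
--     runs = []
--     previous = 0
--     for value in line:
--         sign = 1 if value > previous else -1
--         previous = value
--         if runs and runs[-1][0] == sign:
--             runs[-1][1] += 1
--         else:
--             runs.append([sign, 1])
--     ridges = 0
--     for (s1, n1), (s2, n2) in zip(runs, runs[1:]):
--         if s1 == -1 and n1 >= 2 and s2 == 1 and n2 >= 2:
--             ridges += 1
--     return ridges
-- ===== Notes on version B (the rewrite author's own statement) =====
-- stated objective: alternative
-- what changed: A is an online state machine threading the last three comparison signs and testing each 4-window on the fly; B run-length encodes the up/down sign sequence into (sign, length) runs and counts adjacent pairs of a down-run of length >= 2 followed by an up-run of length >= 2, each such run boundary being exactly one D,D,U,U occurrence.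
import Mathlib
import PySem

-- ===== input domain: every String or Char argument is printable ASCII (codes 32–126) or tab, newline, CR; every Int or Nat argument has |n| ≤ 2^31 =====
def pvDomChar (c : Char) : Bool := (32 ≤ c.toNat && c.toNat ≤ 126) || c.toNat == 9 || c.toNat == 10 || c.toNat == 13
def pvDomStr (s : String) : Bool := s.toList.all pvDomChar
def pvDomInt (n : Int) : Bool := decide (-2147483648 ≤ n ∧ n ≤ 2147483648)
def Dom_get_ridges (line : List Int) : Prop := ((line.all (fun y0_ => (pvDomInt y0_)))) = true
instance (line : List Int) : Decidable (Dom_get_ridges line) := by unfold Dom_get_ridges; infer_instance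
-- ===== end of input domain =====

-- B replaces A's online three-sign window state machine by a run-length encoding
-- of the sign sequence followed by a count of down-run(>=2)/up-run(>=2) boundaries
-- (objective: alternative algorithm, same cost).


-- ===== PORT A =====
-- state = (third_previous, second_previous, first_previous, previous, ridges)
def get_ridges (line : List Int) : Int :=
  (line.foldl
    (fun (st : Int × Int × Int × Int × Int) value =>
      let (tp, sp, fp, prev, ridges) := st
      let new : Int := if value > prev then 1 else -1
      let ridges' := if tp = -1 ∧ sp = -1 ∧ fp = 1 ∧ new = 1 then ridges + 1 else ridges
      (sp, fp, new, value, ridges'))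
    (0, 0, 0, 0, 0)).2.2.2.2

-- ===== PORT B =====
-- python's `runs` list is kept reversed (head = runs[-1]); pvAddRun is the
-- "merge with last run or append a new [sign, 1]" step of Source B
def pvAddRun (sign : Int) : List (Int × Int) → List (Int × Int)
  | [] => [(sign, 1)]
  | (t, n) :: rest => if t = sign then (t, n + 1) :: rest else (sign, 1) :: (t, n) :: rest

def get_ridges_alt (line : List Int) : Int :=
  let st := line.foldl
    (fun (st : List (Int × Int) × Int) value =>
      let (runsRev, prev) := st
      let sign : Int := if value > prev then 1 else -1
      (pvAddRun sign runsRev, value))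
    ([], 0)
  let runs := st.1.reverse
  (List.zip runs (runs.drop 1)).foldl
    (fun ridges p => if p.1.1 = -1 ∧ 2 ≤ p.1.2 ∧ p.2.1 = 1 ∧ 2 ≤ p.2.2 then ridges + 1 else ridges)
    0

-- ===== PRECONDITION & SPEC =====
def Spec_get_ridges (line : List Int) (out : Int) : Prop := out = get_ridges_alt line
instance (line : List Int) (out : Int) : Decidable (Spec_get_ridges line out) := by unfold Spec_get_ridges; infer_instance

-- ===== CLAIM (what is proved, stated in full; the proofs are below) =====
def Claim_equal_get_ridges : Prop := ∀ (line : List Int), Dom_get_ridges line → Spec_get_ridges line (get_ridges line)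

-- ===== LEMMAS AND PROOFS =====

-- the sign sequence (running `previous`, starting value prev)
def pvSigns (prev : Int) : List Int → List Int
  | [] => []
  | v :: t => (if v > prev then (1 : Int) else -1) :: pvSigns v t

-- number of (-1,-1,1,1) windows in a sign list (characterizes A's count)
def pvCountW : List Int → Int
  | a :: b :: c :: d :: t =>
      (if a = -1 ∧ b = -1 ∧ c = 1 ∧ d = 1 then 1 else 0) + pvCountW (b :: c :: d :: t)
  | _ => 0

-- forward run-length encoding
def pvRunsOf : List Int → List (Int × Int)
  | [] => []
  | a :: t => pvAddRun a (pvRunsOf t)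

-- ridge count read off a (forward) run list
def pvCP : List (Int × Int) → Int
  | (s1, n1) :: (s2, n2) :: r =>
      (if s1 = -1 ∧ 2 ≤ n1 ∧ s2 = 1 ∧ 2 ≤ n2 then 1 else 0) + pvCP ((s2, n2) :: r)
  | _ => 0

-- append a sign at the END of a run list
def pvRunSnoc : List (Int × Int) → Int → List (Int × Int)
  | [], a => [(a, 1)]
  | [(c, n)], a => if c = a then [(c, n + 1)] else [(c, n), (a, 1)]
  | (c, n) :: x :: xs, a => (c, n) :: pvRunSnoc (x :: xs) a

-- -------- A's machine computes pvCountW of the sign sequence --------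

theorem pv_machine (line : List Int) (tp sp fp prev r : Int) :
    (line.foldl
      (fun (st : Int × Int × Int × Int × Int) value =>
        let (tp, sp, fp, prev, ridges) := st
        let new : Int := if value > prev then 1 else -1
        let ridges' := if tp = -1 ∧ sp = -1 ∧ fp = 1 ∧ new = 1 then ridges + 1 else ridges
        (sp, fp, new, value, ridges'))
      (tp, sp, fp, prev, r)).2.2.2.2
    = r + pvCountW (tp :: sp :: fp :: pvSigns prev line) := by
  induction line generalizing tp sp fp prev r with
  | nil => simp [pvSigns, pvCountW]
  | cons v t ih =>
      simp only [List.foldl_cons, pvSigns]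
      rw [ih]
      simp only [pvCountW]
      by_cases h : tp = -1 ∧ sp = -1 ∧ fp = 1 ∧ (if v > prev then (1 : Int) else -1) = 1
      · simp only [if_pos h]; ring
      · simp only [if_neg h]; ring

theorem pvCountW_zero_cons (s : List Int) : pvCountW ((0 : Int) :: s) = pvCountW s := by
  rcases s with _ | ⟨a, _ | ⟨b, _ | ⟨c, t⟩⟩⟩ <;> simp [pvCountW]

-- -------- B's fold builds pvRunsOf of the sign sequence --------

theorem pv_fold_signs (line : List Int) (rr : List (Int × Int)) (prev : Int) :
    (line.foldl
      (fun (st : List (Int × Int) × Int) value =>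
        let (runsRev, prev) := st
        let sign : Int := if value > prev then 1 else -1
        (pvAddRun sign runsRev, value))
      (rr, prev)).1
    = (pvSigns prev line).foldl (fun rr s => pvAddRun s rr) rr := by
  induction line generalizing rr prev with
  | nil => simp [pvSigns]
  | cons v t ih => simp only [List.foldl_cons, pvSigns]; exact ih _ _

theorem pvRunsOf_eq_foldr (l : List Int) : pvRunsOf l = l.foldr pvAddRun [] := by
  induction l with
  | nil => rfl
  | cons a t ih => simp [pvRunsOf, ih]

theorem pv_snoc_append (xs : List (Int × Int)) (c n a : Int) :
    pvRunSnoc (xs ++ [(c, n)]) a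
      = if c = a then xs ++ [(c, n + 1)] else xs ++ [(c, n), (a, 1)] := by
  induction xs with
  | nil => simp [pvRunSnoc]
  | cons p xs ih =>
      rcases p with ⟨pc, pn⟩
      rcases hx : xs ++ [(c, n)] with _ | ⟨q2, ys2⟩
      · simp at hx
      · rw [List.cons_append, hx]
        rw [hx] at ih
        simp only [pvRunSnoc]
        rw [ih]
        split_ifs <;> simp

theorem pv_rev_snoc (a : Int) (r : List (Int × Int)) :
    (pvAddRun a r).reverse = pvRunSnoc r.reverse a := by
  rcases r with _ | ⟨⟨c, n⟩, rest⟩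
  · simp [pvAddRun, pvRunSnoc]
  · simp only [pvAddRun, List.reverse_cons]
    rw [pv_snoc_append]
    split_ifs with h1 h2 <;> simp_all

theorem pv_addRun_runSnoc (b a : Int) (r : List (Int × Int)) :
    pvAddRun b (pvRunSnoc r a) = pvRunSnoc (pvAddRun b r) a := by
  rcases r with _ | ⟨⟨c, n⟩, _ | ⟨⟨d, m⟩, rest⟩⟩
  · simp only [pvRunSnoc, pvAddRun]
    split_ifs <;> simp_all [pvRunSnoc]
  · simp only [pvRunSnoc, pvAddRun]
    split_ifs <;> simp_all [pvRunSnoc, pvAddRun] <;> split_ifs <;> simp_all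
  · simp only [pvRunSnoc, pvAddRun]
    split_ifs <;> simp_all [pvRunSnoc, pvAddRun]

theorem pv_runsOf_concat (u : List Int) (a : Int) :
    pvRunsOf (u ++ [a]) = pvRunSnoc (pvRunsOf u) a := by
  induction u with
  | nil => simp [pvRunsOf, pvAddRun, pvRunSnoc]
  | cons b u ih => simp only [List.cons_append, pvRunsOf, ih, pv_addRun_runSnoc]

theorem pv_runsOf_reverse (l : List Int) :
    pvRunsOf l.reverse = (pvRunsOf l).reverse := by
  induction l with
  | nil => rfl
  | cons a l ih =>
      simp only [List.reverse_cons, pv_runsOf_concat, ih, pvRunsOf]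
      rw [pv_rev_snoc]

-- -------- B's pair fold computes pvCP --------

theorem pv_pairFold (runs : List (Int × Int)) (c : Int) :
    (List.zip runs (runs.drop 1)).foldl
      (fun ridges p => if p.1.1 = -1 ∧ 2 ≤ p.1.2 ∧ p.2.1 = 1 ∧ 2 ≤ p.2.2 then ridges + 1 else ridges) c
    = c + pvCP runs := by
  induction runs using pvCP.induct generalizing c with
  | case1 s1 n1 s2 n2 r ih =>
      simp only [List.drop_succ_cons, List.drop_zero, List.zip_cons_cons, List.foldl_cons, pvCP]
        at ih ⊢
      rw [ih]
      by_cases h : s1 = -1 ∧ 2 ≤ n1 ∧ s2 = 1 ∧ 2 ≤ n2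
      · simp [h]; ring
      · simp [h]
  | case2 s h =>
      rcases s with _ | ⟨⟨s1, n1⟩, _ | ⟨⟨s2, n2⟩, r⟩⟩
      · simp [pvCP]
      · simp [pvCP]
      · exact (h s1 n1 s2 n2 r rfl).elim

-- -------- pvCountW of a sign list = pvCP of its run-length encoding --------

-- indicator of a (-1,-1,1,1) window starting at `a :: s`
def pvWInd (a : Int) : List Int → Int
  | b :: c :: d :: _ => if a = -1 ∧ b = -1 ∧ c = 1 ∧ d = 1 then 1 else 0
  | _ => 0

-- the same indicator read off the run list of s
def pvHeadPat (a : Int) : List (Int × Int) → Int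
  | (c, n) :: (d, m) :: _ => if a = -1 ∧ c = -1 ∧ n = 1 ∧ d = 1 ∧ 2 ≤ m then 1 else 0
  | _ => 0

def pvGood (r : List (Int × Int)) : Prop := ∀ p ∈ r, 1 ≤ p.2

theorem pvGood_addRun (a : Int) (r : List (Int × Int)) (h : pvGood r) :
    pvGood (pvAddRun a r) := by
  rcases r with _ | ⟨⟨c, n⟩, rest⟩
  · intro p hp; simp [pvAddRun] at hp; simp [hp]
  · have hn : 1 ≤ n := h (c, n) (by simp)
    simp only [pvAddRun]
    split_ifs
    · intro p hp
      rcases List.mem_cons.1 hp with h1 | h1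
      · simp [h1]; omega
      · exact h p (List.mem_cons_of_mem _ h1)
    · intro p hp
      rcases List.mem_cons.1 hp with h1 | h1
      · simp [h1]
      · exact h p h1
  -- note: in the second branch hp : p ∈ (a,1) :: (c,n) :: rest

theorem pvGood_runsOf (s : List Int) : pvGood (pvRunsOf s) := by
  induction s with
  | nil => intro p hp; simp [pvRunsOf] at hp
  | cons a t ih => exact pvGood_addRun a _ ih

theorem pv_runsOf_head (a : Int) (t : List Int) :
    ∃ k r, pvRunsOf (a :: t) = (a, k) :: r ∧ 1 ≤ k := by
  have hg := pvGood_runsOf t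
  simp only [pvRunsOf]
  rcases h : pvRunsOf t with _ | ⟨⟨c, n⟩, rest⟩
  · exact ⟨1, [], by simp [pvAddRun], by norm_num⟩
  · have hn : 1 ≤ n := hg (c, n) (by rw [h]; simp)
    by_cases hca : c = a
    · subst hca
      exact ⟨n + 1, rest, by simp [pvAddRun], by omega⟩
    · exact ⟨1, (c, n) :: rest, by simp [pvAddRun, hca], by norm_num⟩

theorem pv_cp_addRun (a : Int) (r : List (Int × Int)) (h : pvGood r) :
    pvCP (pvAddRun a r) = pvCP r + pvHeadPat a r := by
  rcases r with _ | ⟨⟨c, n⟩, _ | ⟨⟨d, m⟩, rest⟩⟩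
  · simp [pvAddRun, pvCP, pvHeadPat]
  · have hn : 1 ≤ n := h (c, n) (by simp)
    simp only [pvAddRun, pvHeadPat]
    split_ifs with h1
    · simp [pvCP]
    · simp only [pvCP]
      split_ifs <;> simp_all <;> omega
  · have hn : 1 ≤ n := h (c, n) (by simp)
    have hm : 1 ≤ m := h (d, m) (by simp)
    simp only [pvAddRun]
    by_cases h1 : c = a
    · simp only [if_pos h1, pvCP, pvHeadPat]
      generalize pvCP ((d, m) :: rest) = X
      split_ifs <;> simp_all <;> omega
    · simp only [if_neg h1, pvCP, pvHeadPat]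
      generalize pvCP ((d, m) :: rest) = X
      split_ifs <;> simp_all <;> omega

theorem pv_wind_headPat (a : Int) (s : List Int) :
    pvWInd a s = pvHeadPat a (pvRunsOf s) := by
  rcases s with _ | ⟨b, _ | ⟨c, _ | ⟨d, t⟩⟩⟩
  · simp [pvWInd, pvRunsOf, pvHeadPat]
  · simp only [pvWInd, pvRunsOf, pvAddRun]
    simp [pvHeadPat]
  · simp only [pvWInd, pvRunsOf, pvAddRun]
    split_ifs with h1 <;> simp only [pvHeadPat] <;> split_ifs <;> simp_all <;> omega
  · obtain ⟨k, r, hdt, hk⟩ := pv_runsOf_head d t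
    have h3 : pvRunsOf (b :: c :: d :: t) = pvAddRun b (pvAddRun c ((d, k) :: r)) := by
      simp only [pvRunsOf] at hdt ⊢
      rw [hdt]
    rw [h3]
    by_cases hdc : d = c
    · subst hdc
      rw [show pvAddRun d ((d, k) :: r) = (d, k + 1) :: r from by simp [pvAddRun]]
      by_cases hdb : d = b
      · subst hdb
        rw [show pvAddRun d ((d, k + 1) :: r) = (d, k + 1 + 1) :: r from by simp [pvAddRun]]
        rcases r with _ | ⟨⟨e, me⟩, r'⟩ <;>
          · simp only [pvWInd, pvHeadPat]
            split_ifs <;> simp_all <;> omega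
      · rw [show pvAddRun b ((d, k + 1) :: r) = (b, 1) :: (d, k + 1) :: r from by
          simp [pvAddRun, hdb]]
        simp only [pvWInd, pvHeadPat]
        split_ifs <;> simp_all <;> omega
    · rw [show pvAddRun c ((d, k) :: r) = (c, 1) :: (d, k) :: r from by simp [pvAddRun, hdc]]
      by_cases hcb : c = b
      · subst hcb
        rw [show pvAddRun c ((c, 1) :: (d, k) :: r) = (c, 2) :: (d, k) :: r from by
          simp [pvAddRun]]
        simp only [pvWInd, pvHeadPat]
        split_ifs <;> simp_all <;> omega
      · rw [show pvAddRun b ((c, 1) :: (d, k) :: r) = (b, 1) :: (c, 1) :: (d, k) :: r from by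
          simp [pvAddRun, hcb]]
        simp only [pvWInd, pvHeadPat]
        split_ifs <;> simp_all <;> omega

theorem pvCountW_cons (a : Int) (s : List Int) :
    pvCountW (a :: s) = pvWInd a s + pvCountW s := by
  rcases s with _ | ⟨b, _ | ⟨c, _ | ⟨d, t⟩⟩⟩ <;> simp [pvCountW, pvWInd]

theorem pv_countW_cp (s : List Int) : pvCountW s = pvCP (pvRunsOf s) := by
  induction s with
  | nil => simp [pvCountW, pvRunsOf, pvCP]
  | cons a t ih =>
      rw [pvCountW_cons, ih, pv_wind_headPat]
      have : pvRunsOf (a :: t) = pvAddRun a (pvRunsOf t) := rfl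
      rw [this, pv_cp_addRun a _ (pvGood_runsOf t)]
      ring

-- ===== VERDICT (by name: the statement is the Claim_ definition above) =====
theorem get_ridges_spec : Claim_equal_get_ridges := by
  intro line _
  unfold Spec_get_ridges get_ridges get_ridges_alt
  rw [pv_machine]
  dsimp only
  rw [pv_fold_signs]
  have hfold : (pvSigns 0 line).foldl (fun rr s => pvAddRun s rr) []
      = pvRunsOf (pvSigns 0 line).reverse := by
    rw [pvRunsOf_eq_foldr]
    rw [← List.reverse_reverse (pvSigns 0 line), List.foldl_reverse, List.reverse_reverse]
  rw [hfold, pv_runsOf_reverse, List.reverse_reverse, pv_pairFold]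
  rw [pvCountW_zero_cons, pvCountW_zero_cons, pvCountW_zero_cons, pv_countW_cp]
  try ring
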